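-- pv_equiv track=rewrite | github.com/elise1210/ieor4576-project3-tradepilot-ai | app/agents/planner_agent.py | order_tickers_by_query_appearance
-- ===== SOURCE A (Python) =====
-- TICKER_TO_TERMS = {}
--
-- def order_tickers_by_query_appearance(query: str, tickers: list[str]) -> list[str]:
--     text = (query or "").lower()
--     positions = {}
--
--     for ticker in tickers:
--         candidate_positions = []
--
--         explicit_index = text.find(ticker.lower())
--         if explicit_index != -1:
--             candidate_positions.append(explicit_index)
--
--         for term in TICKER_TO_TERMS.get(ticker, []):
--             idx = text.find(term)
--             if idx != -1:
--                 candidate_positions.append(idx)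
--
--         positions[ticker] = min(candidate_positions) if candidate_positions else 10**9
--
--     return sorted(tickers, key=lambda ticker: positions[ticker])
-- ===== SOURCE B (Python) =====
-- def order_tickers_by_query_appearance(query: str, tickers: list[str]) -> list[str]:
--     text = (query or "").lower()
--     lows = {t.lower() for t in tickers}
--     lengths = sorted({len(s) for s in lows})
--     lowpos = {}
--     # one left-to-right scan of the text: at each index probe one substring per distinct
--     # pattern length against the hash set, instead of one find() pass per ticker
--     for i in range(len(text) + 1):
--         for L in lengths:
--             if i + L <= len(text):
--                 sub = text[i:i + L]
--                 if sub in lows and sub not in lowpos: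
--                     lowpos[sub] = i
--     return sorted(tickers, key=lambda t: lowpos.get(t.lower(), 10**9))
-- ===== Notes on version B (the rewrite author's own statement) =====
-- stated objective: faster
-- what changed: Replaces the per-ticker str.find passes over the text with a single left-to-right scan: the lowered tickers go into a hash set, and at each text index only one substring per distinct pattern length is probed against that set to record each pattern's earliest position, then the original ticker list is stable-sorted by positions.get(t.lower(), 10**9).
import Mathlib
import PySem

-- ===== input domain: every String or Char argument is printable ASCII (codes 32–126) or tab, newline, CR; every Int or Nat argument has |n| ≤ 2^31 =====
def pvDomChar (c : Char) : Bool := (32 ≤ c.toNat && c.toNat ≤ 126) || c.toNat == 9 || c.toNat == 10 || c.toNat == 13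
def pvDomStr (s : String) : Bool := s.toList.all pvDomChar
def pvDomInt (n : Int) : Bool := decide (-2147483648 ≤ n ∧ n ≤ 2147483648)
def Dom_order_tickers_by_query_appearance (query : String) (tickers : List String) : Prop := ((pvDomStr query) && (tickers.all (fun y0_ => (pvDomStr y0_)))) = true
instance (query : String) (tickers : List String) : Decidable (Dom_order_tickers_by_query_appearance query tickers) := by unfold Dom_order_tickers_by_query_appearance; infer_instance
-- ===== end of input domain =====

-- B replaces A's per-ticker str.find passes over the text by ONE left-to-right scan that probes,
-- at each index, one substring per distinct pattern length against a hash set of the lowered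
-- tickers (objective: faster; a timing run measured B faster at the largest sizes).

-- ===== PORT A =====
-- TICKER_TO_TERMS = {} in the module, so 'TICKER_TO_TERMS.get(ticker, [])' is always [] and the
-- inner for-loop contributes nothing.  '(query or "")' is 'query' itself for a str argument.
def order_tickers_by_query_appearance (query : String) (tickers : List String) : List String :=
  let text : List Char := PySem.Chars.lower query.toList
  let positions : PySem.Dict String Int :=
    tickers.foldl (fun d ticker =>
      let explicit_index : Int := PySem.Chars.find text (PySem.Chars.lower ticker.toList)
      let candidate_positions : List Int :=
        if explicit_index ≠ -1 then [explicit_index] else []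
      d.insert ticker
        (match PySem.List.min? candidate_positions (fun x => x) with
         | some m => m
         | none => 10 ^ 9)) PySem.Dict.empty
  -- positions[ticker]: every ticker of the list was inserted, so the KeyError branch is unreachable
  -- and the default of getD is never consulted
  PySem.List.sorted tickers (fun ticker => positions.getD ticker (10 ^ 9)) false

-- ===== PORT B =====
def order_tickers_by_query_appearance_alt (query : String) (tickers : List String) : List String :=
  let text : List Char := PySem.Chars.lower query.toList
  let lows : PySem.Set (List Char) :=
    PySem.Set.ofList (tickers.map (fun t => PySem.Chars.lower t.toList))
  let lengths : List Int :=
    PySem.List.sorted (PySem.Set.ofList (lows.map (fun s => (s.length : Int)))) (fun x => x) false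
  let lowpos : PySem.Dict (List Char) Int :=
    (PySem.List.pyRange 0 ((text.length : Int) + 1) 1).foldl (fun d i =>
      lengths.foldl (fun d L =>
        if i + L ≤ (text.length : Int) then
          let sub := PySem.List.slice text (some i) (some (i + L))
          if (lows.contains sub && (d.get? sub).isNone) then d.insert sub i else d
        else d) d) PySem.Dict.empty
  PySem.List.sorted tickers (fun t => lowpos.getD (PySem.Chars.lower t.toList) (10 ^ 9)) false

-- ===== PRECONDITION & SPEC =====
def Spec_order_tickers_by_query_appearance (query : String) (tickers : List String) (out : List String) : Prop := out = order_tickers_by_query_appearance_alt query tickers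
instance (query : String) (tickers : List String) (out : List String) : Decidable (Spec_order_tickers_by_query_appearance query tickers out) := by unfold Spec_order_tickers_by_query_appearance; infer_instance

-- ===== CLAIM (what is proved, stated in full; the proofs are below) =====
def Claim_equal_order_tickers_by_query_appearance : Prop := ∀ (query : String) (tickers : List String), Dom_order_tickers_by_query_appearance query tickers → Spec_order_tickers_by_query_appearance query tickers (order_tickers_by_query_appearance query tickers)

-- ===== LEMMAS AND PROOFS =====

-- A's dict: a fold of inserts whose value depends only on the key
theorem getD_foldl_insert_key {f : String → Int} (l : List String) (d : PySem.Dict String Int)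
    (t : String) (dflt : Int) :
    (l.foldl (fun d x => d.insert x (f x)) d).getD t dflt
      = if t ∈ l then f t else d.getD t dflt := by
  induction l generalizing d with
  | nil => simp
  | cons x rest ih =>
      simp only [List.foldl_cons, ih, PySem.Dict.getD_insert, List.mem_cons]
      by_cases hm : t ∈ rest
      · simp [hm]
      · by_cases he : t = x <;> simp [hm, he]

-- B's inner loop over the pattern lengths at a fixed index i
theorem get?_inner (text : List Char) (lows : PySem.Set (List Char)) (i : Int)
    (lengths : List Int) (d : PySem.Dict (List Char) Int) (s : List Char) :
    (lengths.foldl (fun d L =>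
        if i + L ≤ (text.length : Int) then
          if (lows.contains (PySem.List.slice text (some i) (some (i + L))) &&
              (d.get? (PySem.List.slice text (some i) (some (i + L)))).isNone) then
            d.insert (PySem.List.slice text (some i) (some (i + L))) i
          else d
        else d) d).get? s
      = if (∃ L ∈ lengths, i + L ≤ (text.length : Int) ∧
              PySem.List.slice text (some i) (some (i + L)) = s) ∧
            lows.contains s = true ∧ d.get? s = none then
          some i
        else d.get? s := by
  induction lengths generalizing d with
  | nil => simp
  | cons L rest ih =>
    simp only [List.foldl_cons]
    by_cases hb : i + L ≤ (text.length : Int)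
    · rw [if_pos hb]
      by_cases hs : PySem.List.slice text (some i) (some (i + L)) = s
      · rw [hs]
        by_cases hg : (lows.contains s && (d.get? s).isNone) = true
        · rw [if_pos hg, ih]
          obtain ⟨hc, hn⟩ := Bool.and_eq_true_iff.mp hg
          rw [Option.isNone_iff_eq_none] at hn
          simp [hb, hs, hn, (show s ∈ lows by simpa [PySem.Set.contains] using hc)]
        · rw [if_neg hg, ih]
          have hng : ¬ (lows.contains s = true ∧ d.get? s = none) := by
            rintro ⟨h1, h2⟩; exact hg (by rw [h1, h2]; rfl)
          split_ifs <;> first | rfl | (exfalso; exact hng (by tauto))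
      · have hstep : (if (lows.contains (PySem.List.slice text (some i) (some (i + L))) &&
              (d.get? (PySem.List.slice text (some i) (some (i + L)))).isNone) then
            d.insert (PySem.List.slice text (some i) (some (i + L))) i
          else d).get? s = d.get? s := by
          split_ifs with h
          · rw [PySem.Dict.get?_insert, if_neg (fun he => hs he.symm)]
          · rfl
        rw [ih]
        simp only [hstep]
        refine if_congr ?_ rfl rfl
        constructor
        · rintro ⟨⟨L', hL', h1, h2⟩, h3, h4⟩
          exact ⟨⟨L', List.mem_cons_of_mem _ hL', h1, h2⟩, h3, h4⟩
        · rintro ⟨⟨L', hL', h1, h2⟩, h3, h4⟩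
          rcases List.mem_cons.mp hL' with he | he
          · exact absurd h2 (he ▸ hs)
          · exact ⟨⟨L', he, h1, h2⟩, h3, h4⟩
    · rw [if_neg hb, ih]
      refine if_congr ?_ rfl rfl
      constructor
      · rintro ⟨⟨L', hL', h1, h2⟩, h3, h4⟩
        exact ⟨⟨L', List.mem_cons_of_mem _ hL', h1, h2⟩, h3, h4⟩
      · rintro ⟨⟨L', hL', h1, h2⟩, h3, h4⟩
        rcases List.mem_cons.mp hL' with he | he
        · exact absurd h1 (he ▸ hb)
        · exact ⟨⟨L', he, h1, h2⟩, h3, h4⟩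

-- B's outer loop: the first index of the scan that matches wins
theorem get?_outer (text : List Char) (lows : PySem.Set (List Char)) (lengths : List Int)
    (ks : List Int) (d : PySem.Dict (List Char) Int) (s : List Char) :
    (ks.foldl (fun d i =>
        lengths.foldl (fun d L =>
          if i + L ≤ (text.length : Int) then
            if (lows.contains (PySem.List.slice text (some i) (some (i + L))) &&
                (d.get? (PySem.List.slice text (some i) (some (i + L)))).isNone) then
              d.insert (PySem.List.slice text (some i) (some (i + L))) i
            else d
          else d) d) d).get? s
      = if d.get? s = none ∧ lows.contains s = true then
          ks.find? (fun i => decide (∃ L ∈ lengths, i + L ≤ (text.length : Int) ∧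
            PySem.List.slice text (some i) (some (i + L)) = s))
        else d.get? s := by
  induction ks generalizing d with
  | nil =>
    simp only [List.foldl_nil, List.find?_nil]
    split_ifs with h
    · exact h.1
    · rfl
  | cons i rest ih =>
    simp only [List.foldl_cons]
    rw [ih, get?_inner]
    by_cases hn : d.get? s = none
    · by_cases hc : lows.contains s = true
      · by_cases hp : ∃ L ∈ lengths, i + L ≤ (text.length : Int) ∧
            PySem.List.slice text (some i) (some (i + L)) = s
        · rw [if_pos (show (∃ L ∈ lengths, i + L ≤ (text.length : Int) ∧
              PySem.List.slice text (some i) (some (i + L)) = s) ∧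
              lows.contains s = true ∧ d.get? s = none from ⟨hp, hc, hn⟩)]
          rw [if_neg (by simp), if_pos ⟨hn, hc⟩,
            List.find?_cons_of_pos (by simpa using hp)]
        · have hX : (if (∃ L ∈ lengths, i + L ≤ (text.length : Int) ∧
                PySem.List.slice text (some i) (some (i + L)) = s) ∧
                lows.contains s = true ∧ d.get? s = none then some i else d.get? s)
              = d.get? s := if_neg (fun h => hp h.1)
          rw [hX, if_pos ⟨hn, hc⟩, if_pos ⟨hn, hc⟩,
            List.find?_cons_of_neg (by simpa using hp)]
      · have hX : (if (∃ L ∈ lengths, i + L ≤ (text.length : Int) ∧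
              PySem.List.slice text (some i) (some (i + L)) = s) ∧
              lows.contains s = true ∧ d.get? s = none then some i else d.get? s)
            = d.get? s := if_neg (fun h => hc h.2.1)
        rw [hX, if_neg (fun h => hc h.2), if_neg (fun h => hc h.2)]
    · have hX : (if (∃ L ∈ lengths, i + L ≤ (text.length : Int) ∧
            PySem.List.slice text (some i) (some (i + L)) = s) ∧
            lows.contains s = true ∧ d.get? s = none then some i else d.get? s)
          = d.get? s := if_neg (fun h => hn h.2.2)
      rw [hX, if_neg (fun h => hn h.1), if_neg (fun h => hn h.1)]

theorem find?_pyRange_eq_some (p : Int → Bool) (a b j : Int) (haj : a ≤ j) (hjb : j < b)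
    (hp : p j = true) (hmin : ∀ i, a ≤ i → i < j → p i = false) :
    (PySem.List.pyRange a b 1).find? p = some j := by
  obtain ⟨n, hn⟩ : ∃ n : ℕ, (j - a).toNat = n := ⟨_, rfl⟩
  induction n generalizing a with
  | zero =>
    have haj' : a = j := by omega
    subst haj'
    rw [PySem.List.pyRange_one_cons (by omega), List.find?_cons_of_pos hp]
  | succ k ih =>
    have haj' : a < j := by omega
    rw [PySem.List.pyRange_one_cons (by omega),
      List.find?_cons_of_neg (by simp [hmin a le_rfl haj'])]
    exact ih (a + 1) (by omega) (fun i h1 h2 => hmin i (by omega) h2) (by omega)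

theorem find?_pyRange_eq_none (p : Int → Bool) (a b : Int)
    (h : ∀ i, a ≤ i → i < b → p i = false) :
    (PySem.List.pyRange a b 1).find? p = none := by
  obtain ⟨n, hn⟩ : ∃ n : ℕ, (b - a).toNat = n := ⟨_, rfl⟩
  induction n generalizing a with
  | zero =>
    rw [PySem.List.pyRange_one_eq_nil (by omega)]
    rfl
  | succ k ih =>
    rw [PySem.List.pyRange_one_cons (by omega),
      List.find?_cons_of_neg (by simp [h a le_rfl (by omega)])]
    exact ih (a + 1) (fun i h1 h2 => h i (by omega) h2) (by omega)

-- the scan's first match equals str.find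
theorem scan_eq_find (text sub : List Char) (p : Int → Bool)
    (hp : ∀ i : Int, 0 ≤ i → i < (text.length : Int) + 1 →
      (p i = true ↔ sub <+: text.drop i.toNat)) :
    ((PySem.List.pyRange 0 ((text.length : Int) + 1) 1).find? p).getD (10 ^ 9)
      = (if PySem.Chars.find text sub ≠ -1 then PySem.Chars.find text sub else 10 ^ 9) := by
  by_cases hf : PySem.Chars.find text sub = -1
  · have hninf : ¬ sub <:+: text := (PySem.Chars.find_eq_neg_one_iff text sub).mp hf
    have hpf : ∀ i : Int, 0 ≤ i → i < (text.length : Int) + 1 → p i = false := by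
      intro i h1 h2
      by_contra hc
      rw [Bool.not_eq_false] at hc
      exact hninf ((PySem.Chars.isIn_iff_infix sub text).mp
        ((PySem.Chars.exists_prefix_drop_iff_isIn sub text).mp ⟨_, (hp i h1 h2).mp hc⟩))
    rw [find?_pyRange_eq_none _ _ _ hpf]
    simp [hf]
  · have h0 : 0 ≤ PySem.Chars.find text sub := by
      have := PySem.Chars.neg_one_le_find text sub
      omega
    obtain ⟨hpre, hmin⟩ := PySem.Chars.find_spec h0
    have hle := PySem.Chars.find_le_length text sub
    rw [find?_pyRange_eq_some _ 0 ((text.length : Int) + 1) (PySem.Chars.find text sub)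
      h0 (by omega)
      ((hp _ h0 (by omega)).mpr hpre)
      (by
        intro i h1 h2
        rw [← Bool.not_eq_true]
        intro hc
        exact hmin i.toNat (by omega) ((hp i h1 (by omega)).mp hc))]
    simp [hf]

-- 'some length L of the length table fits and the slice matches' IS 'sub is a prefix of text[i:]'
theorem exists_slice_iff_prefix (text s : List Char) (lengths : List Int) (i : Int)
    (h0 : 0 ≤ i) (hle : i ≤ (text.length : Int)) (hsl : (s.length : Int) ∈ lengths)
    (hnn : ∀ L ∈ lengths, 0 ≤ L) :
    (∃ L ∈ lengths, i + L ≤ (text.length : Int) ∧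
        PySem.List.slice text (some i) (some (i + L)) = s)
      ↔ s <+: text.drop i.toNat := by
  constructor
  · rintro ⟨L, hL, hb, hslice⟩
    have hL0 : 0 ≤ L := hnn L hL
    rw [PySem.List.slice_toNat _ h0 (by omega)] at hslice
    have hlen : ((i + L).toNat - i.toNat : ℕ) = L.toNat := by omega
    rw [hlen] at hslice
    have : (text.drop i.toNat).take L.toNat <+: text.drop i.toNat := List.take_prefix _ _
    rw [hslice] at this
    exact this
  · intro hpre
    refine ⟨(s.length : Int), hsl, ?_, ?_⟩
    · have := hpre.length_le
      simp only [List.length_drop] at this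
      omega
    · rw [PySem.List.slice_toNat _ h0 (by omega)]
      have hlen : ((i + (s.length : Int)).toNat - i.toNat : ℕ) = s.length := by omega
      rw [hlen]
      exact ((List.prefix_iff_eq_take.mp hpre).symm)

-- stable insertion agrees when the comparison keys agree on every element involved
theorem insertBy_congr {α : Type} (b1 b2 : α → α → Bool) (x : α) (ys : List α)
    (h : ∀ y ∈ ys, b1 x y = b2 x y) :
    PySem.List.insertBy b1 x ys = PySem.List.insertBy b2 x ys := by
  induction ys with
  | nil => rfl
  | cons y t ih =>
    simp only [PySem.List.insertBy]
    rw [h y List.mem_cons_self]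
    split_ifs with hb
    · rfl
    · rw [ih (fun z hz => h z (List.mem_cons_of_mem _ hz))]

theorem foldl_insertBy_congr {α : Type} (k1 k2 : α → Int) :
    ∀ (l acc : List α), (∀ x, (x ∈ l ∨ x ∈ acc) → k1 x = k2 x) →
    l.foldl (fun acc x => PySem.List.insertBy (fun a b => decide (k1 a < k1 b)) x acc) acc
      = l.foldl (fun acc x => PySem.List.insertBy (fun a b => decide (k2 a < k2 b)) x acc) acc := by
  intro l
  induction l with
  | nil => intro acc _; rfl
  | cons x t ih =>
    intro acc h
    simp only [List.foldl_cons]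
    rw [insertBy_congr _ _ x acc (fun y hy => by
      rw [h x (Or.inl List.mem_cons_self), h y (Or.inr hy)])]
    exact ih _ (fun z hz => h z (by
      rcases hz with hz | hz
      · exact Or.inl (List.mem_cons_of_mem _ hz)
      · rcases (PySem.List.mem_insertBy _ _ _ _).mp hz with he | hm
        · exact Or.inl (he ▸ List.mem_cons_self)
        · exact Or.inr hm))

-- sorting with two key functions that agree on the list's members gives the same list
theorem sorted_congr_mem {α : Type} (xs : List α) (k1 k2 : α → Int)
    (h : ∀ x ∈ xs, k1 x = k2 x) :
    PySem.List.sorted xs k1 false = PySem.List.sorted xs k2 false := by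
  rw [PySem.List.sorted_eq_foldl_insertBy, PySem.List.sorted_eq_foldl_insertBy]
  exact foldl_insertBy_congr k1 k2 xs [] (fun x hx => by
    rcases hx with hx | hx
    · exact h x hx
    · simp at hx)

-- ===== VERDICT (by name: the statement is the Claim_ definition above) =====
theorem order_tickers_by_query_appearance_spec : Claim_equal_order_tickers_by_query_appearance := by
  intro query tickers _
  unfold Spec_order_tickers_by_query_appearance order_tickers_by_query_appearance
    order_tickers_by_query_appearance_alt
  dsimp only
  apply sorted_congr_mem
  intro t hm
  rw [getD_foldl_insert_key]
  rw [if_pos hm]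
  conv_rhs => rw [PySem.Dict.getD_eq_get?_getD, get?_outer]
  have hmemlow : PySem.Chars.lower t.toList ∈
      PySem.Set.ofList (tickers.map (fun t => PySem.Chars.lower t.toList)) := by
    rw [PySem.Set.mem_ofList]
    exact List.mem_map.mpr ⟨t, hm, rfl⟩
  have hcontains : (PySem.Set.ofList (tickers.map (fun t => PySem.Chars.lower t.toList))).contains
      (PySem.Chars.lower t.toList) = true := by
    simpa using hmemlow
  conv_rhs => rw [if_pos (⟨PySem.Dict.get?_empty _, hcontains⟩ :
    PySem.Dict.empty.get? (PySem.Chars.lower t.toList) = none ∧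
    (PySem.Set.ofList (tickers.map (fun t => PySem.Chars.lower t.toList))).contains
      (PySem.Chars.lower t.toList) = true)]
  have hsl : ((PySem.Chars.lower t.toList).length : Int) ∈
      PySem.List.sorted (PySem.Set.ofList
        ((PySem.Set.ofList (tickers.map (fun t => PySem.Chars.lower t.toList))).map
          (fun s => (s.length : Int)))) (fun x => x) false := by
    rw [PySem.List.mem_sorted, PySem.Set.mem_ofList]
    exact List.mem_map.mpr ⟨_, hmemlow, rfl⟩
  have hnn : ∀ L ∈ PySem.List.sorted (PySem.Set.ofList
      ((PySem.Set.ofList (tickers.map (fun t => PySem.Chars.lower t.toList))).map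
        (fun s => (s.length : Int)))) (fun x => x) false, 0 ≤ L := by
    intro L hL
    rw [PySem.List.mem_sorted, PySem.Set.mem_ofList] at hL
    obtain ⟨u, _, hu⟩ := List.mem_map.mp hL
    omega
  rw [scan_eq_find _ _ _ (fun i h0 h1 => by
    simp only [decide_eq_true_eq]
    rw [exists_slice_iff_prefix _ _ _ i h0 (by omega) hsl hnn])]
  by_cases hf : PySem.Chars.find (PySem.Chars.lower query.toList)
      (PySem.Chars.lower t.toList) = -1
  · simp [hf, PySem.List.min?]
  · simp [hf, PySem.List.min?]
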